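-- pv_equiv track=rewrite | github.com/Li-ionFractalNanocore/Leetcode | exercise/enum-right-maintain-left/2260/1.py | minimumCardPickup
-- ===== SOURCE A (Python) =====
-- from typing import List
--
-- def minimumCardPickup(cards: List[int]) -> int:
--     record = dict()
--     result = len(cards) + 1
--     for i, card in enumerate(cards):
--         if card in record:
--             result = min(result, i - record[card] + 1)
--         record[card] = i
--
--     return result if result != len(cards) + 1 else -1
-- ===== SOURCE B (Python) =====
-- def minimumCardPickup(cards):
--     n = len(cards)
--     best = n + 1
--     for i in range(n):
--         j = i - 1
--         while j >= 0:
--             if cards[j] == cards[i]: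
--                 best = min(best, i - j + 1)
--                 break
--             j -= 1
--     return best if best != n + 1 else -1
-- ===== Notes on version B (the rewrite author's own statement) =====
-- stated objective: alternative
-- what changed: Replaces the dict that tracks each value's last index with a dict-free brute-force backward scan: for every position the inner loop walks left to the nearest earlier equal card, which is exactly the pair the dict lookup would have found.
import Mathlib
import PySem

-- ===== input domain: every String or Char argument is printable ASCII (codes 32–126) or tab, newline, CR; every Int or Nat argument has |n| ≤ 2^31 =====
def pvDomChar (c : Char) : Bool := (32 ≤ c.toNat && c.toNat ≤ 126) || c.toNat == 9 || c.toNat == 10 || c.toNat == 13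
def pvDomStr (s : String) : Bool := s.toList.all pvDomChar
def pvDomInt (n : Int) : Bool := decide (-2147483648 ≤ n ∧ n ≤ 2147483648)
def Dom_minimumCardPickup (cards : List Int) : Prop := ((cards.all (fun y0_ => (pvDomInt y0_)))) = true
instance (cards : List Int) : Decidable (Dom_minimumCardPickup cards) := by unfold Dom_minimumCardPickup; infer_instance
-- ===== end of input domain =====

-- B replaces A's dict of last-seen indices by a dict-free nested backward scan to the
-- nearest earlier equal card (alternative decomposition, same return value; not faster).

-- ===== PORT A =====
def pvStepA (st : PySem.Dict Int Int × Int) (p : Int × Int) : PySem.Dict Int Int × Int :=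
  let result :=
    match st.1.get? p.2 with
    | some j => min st.2 (p.1 - j + 1)
    | none => st.2
  (st.1.insert p.2 p.1, result)

def minimumCardPickup (cards : List Int) : Int :=
  let st := (PySem.List.enumerate cards).foldl pvStepA (PySem.Dict.empty, (cards.length : Int) + 1)
  if st.2 ≠ (cards.length : Int) + 1 then st.2 else -1

-- ===== PORT B =====
-- inner `while j >= 0` loop of Source B: first index ≤ j (scanning downward) holding c
def pvBackFind (cards : List Int) (c : Int) : Nat → Option Nat
  | 0 => if PySem.List.pyGetD cards 0 0 = c then some 0 else none
  | j+1 => if PySem.List.pyGetD cards ((j+1 : Nat) : Int) 0 = c then some (j+1) else pvBackFind cards c j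

def pvStepB (cards : List Int) (best : Int) (i : Nat) : Int :=
  match i with
  | 0 => best
  | i'+1 =>
    match pvBackFind cards (PySem.List.pyGetD cards ((i'+1 : Nat) : Int) 0) i' with
    | some j => min best (((i'+1 : Nat) : Int) - (j : Int) + 1)
    | none => best

def minimumCardPickup_alt (cards : List Int) : Int :=
  let best := (List.range cards.length).foldl (pvStepB cards) ((cards.length : Int) + 1)
  if best ≠ (cards.length : Int) + 1 then best else -1

-- ===== PRECONDITION & SPEC =====
def Spec_minimumCardPickup (cards : List Int) (out : Int) : Prop := out = minimumCardPickup_alt cards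
instance (cards : List Int) (out : Int) : Decidable (Spec_minimumCardPickup cards out) := by unfold Spec_minimumCardPickup; infer_instance

-- ===== CLAIM (what is proved, stated in full; the proofs are below) =====
def Claim_equal_minimumCardPickup : Prop := ∀ (cards : List Int), Dom_minimumCardPickup cards → Spec_minimumCardPickup cards (minimumCardPickup cards)

-- ===== LEMMAS AND PROOFS =====

-- index of the nearest occurrence of c strictly below k (what A's dict stores after k steps)
def pvPrevLt (cards : List Int) (c : Int) : Nat → Option Nat
  | 0 => none
  | k+1 => pvBackFind cards c k

lemma pvPrevLt_succ (cards : List Int) (c : Int) (k : Nat) :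
    pvPrevLt cards c (k+1)
      = if PySem.List.pyGetD cards (k : Int) 0 = c then some k else pvPrevLt cards c k := by
  cases k <;> simp [pvPrevLt, pvBackFind]

lemma pvInv (cards : List Int) (k : Nat) (hk : k ≤ cards.length) :
    (((PySem.List.enumerate (cards.take k)).foldl pvStepA
        (PySem.Dict.empty, (cards.length : Int) + 1)).2
      = (List.range k).foldl (pvStepB cards) ((cards.length : Int) + 1))
    ∧ ∀ c, ((PySem.List.enumerate (cards.take k)).foldl pvStepA
        (PySem.Dict.empty, (cards.length : Int) + 1)).1.get? c
      = (pvPrevLt cards c k).map (fun j => (j : Int)) := by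
  induction k with
  | zero =>
    simp [pvPrevLt, PySem.List.enumerate_nil, PySem.Dict.get?_empty]
  | succ k ih =>
    have hklt : k < cards.length := hk
    obtain ⟨ih1, ih2⟩ := ih (le_of_lt hklt)
    have htake : cards.take (k+1) = cards.take k ++ [cards[k]] := by
      rw [List.take_add_one, List.getElem?_eq_getElem hklt]; rfl
    have hget : PySem.List.pyGetD cards (k : Int) 0 = cards[k] := by
      rw [PySem.List.pyGetD_natCast]
      simp [List.getD, List.getElem?_eq_getElem hklt]
    rw [htake, PySem.List.enumerate_append, List.range_succ]
    have hlen : (cards.take k).length = k := List.length_take_of_le (le_of_lt hklt)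
    rw [hlen]
    simp only [PySem.List.enumerate_cons, PySem.List.enumerate_nil, List.foldl_append,
      List.foldl_cons, List.foldl_nil, zero_add]
    constructor
    · -- second components agree after the step
      show (pvStepA _ ((k : Int), cards[k])).2 = pvStepB cards _ k
      cases k with
      | zero =>
        simp only [pvStepA, pvStepB, ih2, pvPrevLt]
        exact ih1
      | succ k' =>
        simp only [pvStepA, pvStepB, ih2, pvPrevLt]
        rw [← hget]
        cases pvBackFind cards (PySem.List.pyGetD cards ((k'+1 : Nat) : Int) 0) k' with
        | none => simpa using ih1
        | some j => simp [ih1]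
    · intro c
      show (pvStepA _ ((k : Int), cards[k])).1.get? c = _
      simp only [pvStepA]
      rw [PySem.Dict.get?_insert, pvPrevLt_succ, hget, ih2]
      by_cases hc : c = cards[k]
      · simp [hc]
      · have hcs : ¬ cards[k] = c := fun h => hc h.symm
        simp [hc, hcs]

-- ===== VERDICT (by name: the statement is the Claim_ definition above) =====
theorem minimumCardPickup_spec : Claim_equal_minimumCardPickup := by
  intro cards _
  unfold Spec_minimumCardPickup minimumCardPickup minimumCardPickup_alt
  have h := (pvInv cards cards.length le_rfl).1
  rw [List.take_length] at h
  simp only [h]
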